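-- pv_equiv track=rewrite | github.com/olexandr0209/dreamx-v2 | backend/app/engine/tournament_groups/grouping.py | make_groups
-- ===== SOURCE A (Python) =====
-- def make_groups(tg_user_ids: list[int], base_size: int = 4) -> list[list[int]]:
--     """
--     Твоя логіка:
--     - базово по 4
--     - якщо хвіст 1 або 2 -> додаємо в останню групу (отримаємо 5 або 6)
--     - якщо хвіст 3 -> окрема група з 3
--     Також:
--     - якщо всього <= 6 -> одна група розміру N (3..6)
--     - якщо 2 -> одна група 2 (фінал)
--     - якщо 1 -> переможець (груп не треба)
--     """
--     ids = list(tg_user_ids)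
--     n = len(ids)
--     if n <= 1:
--         return []
--     if n <= 6:
--         return [ids]
--
--     groups: list[list[int]] = []
--     i = 0
--     while i + base_size <= n:
--         groups.append(ids[i:i+base_size])
--         i += base_size
--
--     rem = n - i
--     if rem == 0:
--         return groups
--     if rem in (1, 2):
--         # додаємо в останню групу
--         groups[-1].extend(ids[i:])
--         return groups
--     if rem == 3:
--         groups.append(ids[i:])
--         return groups
--
--     # теоретично сюди не потрапимо при base_size=4,
--     # але залишимо як safety:
--     groups.append(ids[i:])
--     return groups
-- ===== SOURCE B (Python) =====
-- def make_groups(tg_user_ids: list[int], base_size: int = 4) -> list[list[int]]: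
--     ids = list(tg_user_ids)
--     n = len(ids)
--     if n <= 1:
--         return []
--     if n <= 6:
--         return [ids]
--     # number of groups: one per full block of base_size, plus one extra only
--     # when the tail has at least 3 members; a tail of 1 or 2 is absorbed.
--     num = n // base_size + (1 if n % base_size >= 3 else 0)
--     out: list[list[int]] = [[] for _ in range(num)]
--     for i, x in enumerate(ids):
--         out[min(i // base_size, num - 1)].append(x)
--     return out
-- ===== Notes on version B (the rewrite author's own statement) =====
-- stated objective: alternative
-- what changed: Replaces A's slicing while-loop plus four tail-patching branches by index-arithmetic bucketing: the number of groups is computed up front from divmod and each element is dispatched in one enumerate pass into a preallocated bucket via min(i // base_size, num-1), no slicing and no post-hoc tail repair.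
import Mathlib
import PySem

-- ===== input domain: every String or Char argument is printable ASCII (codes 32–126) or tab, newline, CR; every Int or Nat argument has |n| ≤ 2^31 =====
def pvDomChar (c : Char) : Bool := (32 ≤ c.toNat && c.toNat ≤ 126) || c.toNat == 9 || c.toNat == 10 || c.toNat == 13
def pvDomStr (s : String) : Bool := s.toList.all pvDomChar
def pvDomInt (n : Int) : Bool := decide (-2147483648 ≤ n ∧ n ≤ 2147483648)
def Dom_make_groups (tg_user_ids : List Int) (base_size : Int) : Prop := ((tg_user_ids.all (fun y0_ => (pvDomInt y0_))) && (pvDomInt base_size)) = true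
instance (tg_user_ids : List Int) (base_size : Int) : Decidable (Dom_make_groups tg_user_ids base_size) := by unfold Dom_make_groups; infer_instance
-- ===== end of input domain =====

-- B replaces A's slicing while-loop plus four tail-patching branches by index-arithmetic
-- bucketing: group count from divmod up front, then one enumerate pass dispatching each
-- element into a preallocated bucket via min(i // base_size, num - 1) (objective: alternative).

-- ===== PORT A =====
-- the while loop; fuel n.toNat+1 suffices since with base_size ≥ 1 (Pre_) the loop runs at most n times
def pvALoop (ids : List Int) (base n : Int) : Nat → Int → List (List Int) → List (List Int) × Int
  | 0, i, gs => (gs, i)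
  | f+1, i, gs =>
      if i + base ≤ n then
        pvALoop ids base n f (i + base) (gs ++ [PySem.List.slice ids (some i) (some (i + base))])
      else (gs, i)

def make_groups (tg_user_ids : List Int) (base_size : Int) : List (List Int) :=
  let ids := tg_user_ids
  let n : Int := ids.length
  if n ≤ 1 then []
  else if n ≤ 6 then [ids]
  else
    let p := pvALoop ids base_size n (n.toNat + 1) 0 []
    let groups := p.1
    let i := p.2
    let rem := n - i
    if rem = 0 then groups
    else if rem = 1 ∨ rem = 2 then
      -- groups[-1].extend(ids[i:]); groups is nonempty on every input reaching this branch
      groups.dropLast ++ [groups.getLastD [] ++ PySem.List.slice ids (some i) none]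
    else if rem = 3 then groups ++ [PySem.List.slice ids (some i) none]
    else groups ++ [PySem.List.slice ids (some i) none]

-- ===== PORT B =====
def make_groups_alt (tg_user_ids : List Int) (base_size : Int) : List (List Int) :=
  let ids := tg_user_ids
  let n : Int := ids.length
  if n ≤ 1 then []
  else if n ≤ 6 then [ids]
  else
    let num : Int := PySem.Int.floordiv n base_size +
      (if 3 ≤ PySem.Int.mod n base_size then 1 else 0)
    let out : List (List Int) := List.replicate num.toNat []
    (PySem.List.enumerate ids 0).foldl
      (fun acc p =>
        acc.modify (min (PySem.Int.floordiv p.1 base_size) (num - 1)).toNat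
          (fun g => g ++ [p.2]))
      out

-- ===== PRECONDITION & SPEC =====
-- Pre_ excludes base_size ≤ 0 when more than 6 ids are given: there A's while loop never
-- terminates (i never grows past n), so A returns on exactly the inputs admitted here.
def Pre_make_groups (tg_user_ids : List Int) (base_size : Int) : Prop :=
  tg_user_ids.length ≤ 6 ∨ 1 ≤ base_size
instance (tg_user_ids : List Int) (base_size : Int) : Decidable (Pre_make_groups tg_user_ids base_size) := by unfold Pre_make_groups; infer_instance

def pvWitness_make_groups : List Int × Int := ([1, 2, 3, 4, 5, 6, 7, 8, 9], 4)

def Spec_make_groups (tg_user_ids : List Int) (base_size : Int) (out : List (List Int)) : Prop := out = make_groups_alt tg_user_ids base_size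
instance (tg_user_ids : List Int) (base_size : Int) (out : List (List Int)) : Decidable (Spec_make_groups tg_user_ids base_size out) := by unfold Spec_make_groups; infer_instance

-- ===== CLAIM (what is proved, stated in full; the proofs are below) =====
def Claim_equal_make_groups : Prop := ∀ (tg_user_ids : List Int) (base_size : Int), Dom_make_groups tg_user_ids base_size → Pre_make_groups tg_user_ids base_size → Spec_make_groups tg_user_ids base_size (make_groups tg_user_ids base_size)

-- ===== LEMMAS AND PROOFS =====

-- shared reindexing step for both characterizations
theorem pv_chunk_shift (ids : List Int) (b a m : Nat) :
    [(ids.drop a).take b] ++ (List.range m).map (fun j => (ids.drop (a + b + j * b)).take b)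
      = (List.range (m + 1)).map (fun j => (ids.drop (a + j * b)).take b) := by
  rw [List.range_succ_eq_map]
  simp only [List.map_cons, List.map_map, List.singleton_append]
  congr 1
  · norm_num
  · apply List.map_congr_left
    intro j _
    simp only [Function.comp_apply]
    congr 2
    simp only [Nat.succ_eq_add_one]
    ring

-- characterization of A's while loop: m full chunks of size b starting at offset a
theorem pvALoop_char (ids : List Int) (b : Nat) (_hb : 0 < b) :
    ∀ (m fuel a : Nat) (gs : List (List Int)), m ≤ fuel →
      a + m * b ≤ ids.length → ids.length < a + (m + 1) * b →
      pvALoop ids (b : Int) (ids.length : Int) fuel (a : Int) gs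
        = (gs ++ (List.range m).map (fun j => (ids.drop (a + j * b)).take b),
           ((a + m * b : Nat) : Int)) := by
  intro m
  induction m with
  | zero =>
      intro fuel a gs _ _ hlt
      cases fuel with
      | zero => simp [pvALoop]
      | succ f =>
          have hcond : ¬ ((a : Int) + (b : Int) ≤ (ids.length : Int)) := by
            omega
          simp [pvALoop, hcond]
  | succ m ih =>
      intro fuel a gs hfuel hle hlt
      cases fuel with
      | zero => omega
      | succ f =>
          have hcond : ((a : Int) + (b : Int) ≤ (ids.length : Int)) := by
            have : a + b ≤ a + (m + 1) * b := by nlinarith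
            omega
          have hcast : (a : Int) + (b : Int) = ((a + b : Nat) : Int) := by push_cast; ring
          have hslice : PySem.List.slice ids (some (a : Int)) (some ((a : Int) + (b : Int)))
              = (ids.drop a).take b := by
            exact_mod_cast PySem.List.slice_natCast_add ids a b
          have ih' := ih f (a + b) (gs ++ [(ids.drop a).take b]) (by omega)
            (by nlinarith) (by nlinarith)
          show (if (a : Int) + (b : Int) ≤ (ids.length : Int) then
              pvALoop ids (b : Int) (ids.length : Int) f ((a : Int) + (b : Int))
                (gs ++ [PySem.List.slice ids (some (a : Int)) (some ((a : Int) + (b : Int)))])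
            else (gs, (a : Int))) = _
          rw [if_pos hcond, hslice, hcast, ih']
          simp only [Prod.mk.injEq]
          constructor
          · rw [List.append_assoc, pv_chunk_shift]
          · congr 1
            ring

-- a base-sized chunk followed by the rest of the list is the rest from the chunk's start
theorem pv_take_drop_glue (ids : List Int) (c b : Nat) :
    (ids.drop c).take b ++ ids.drop (c + b) = ids.drop c := by
  have h : ids.drop (c + b) = (ids.drop c).drop b := by
    simp [List.drop_drop]
  rw [h, List.take_append_drop]

-- List.modify plumbing for B's bucket updates
theorem pv_modify_cons_succ (x : List Int) (xs : List (List Int)) (n : Nat)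
    (f : List Int → List Int) :
    (x :: xs).modify (n + 1) f = x :: xs.modify n f := by
  simp [List.modify]

theorem pv_modify_modify (l : List (List Int)) (i : Nat) (f g : List Int → List Int) :
    (l.modify i f).modify i g = l.modify i (fun x => g (f x)) := by
  induction l generalizing i with
  | nil => simp
  | cons x xs ih =>
      cases i with
      | zero => simp
      | succ n => rw [pv_modify_cons_succ, pv_modify_cons_succ, pv_modify_cons_succ, ih]

theorem pv_modify_id (l : List (List Int)) (i : Nat) :
    l.modify i (fun x => x) = l := by
  induction l generalizing i with
  | nil => simp
  | cons x xs ih =>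
      cases i with
      | zero => simp
      | succ n => rw [pv_modify_cons_succ, ih]

theorem pv_modify_append (pre : List (List Int)) (x : List Int) (suf : List (List Int))
    (f : List Int → List Int) :
    (pre ++ x :: suf).modify pre.length f = pre ++ f x :: suf := by
  induction pre with
  | nil => simp
  | cons y ys ih =>
      rw [List.cons_append, List.length_cons, pv_modify_cons_succ, ih]
      simp

-- a run of scatter steps that all hit the same bucket g extends bucket g by the run's values
theorem pv_scatter_const (bI mI : Int) :
    ∀ (ps : List (Int × Int)) (acc : List (List Int)) (g : Nat),
      (∀ p ∈ ps, (min (PySem.Int.floordiv p.1 bI) mI).toNat = g) →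
      ps.foldl (fun acc p =>
          acc.modify (min (PySem.Int.floordiv p.1 bI) mI).toNat (fun t => t ++ [p.2])) acc
        = acc.modify g (fun t => t ++ ps.map (·.2)) := by
  intro ps
  induction ps with
  | nil => intro acc g _; simp [pv_modify_id]
  | cons p ps ih =>
      intro acc g h
      have hp : (min (PySem.Int.floordiv p.1 bI) mI).toNat = g := h p (by simp)
      simp only [List.foldl_cons, hp]
      rw [ih _ g (fun q hq => h q (by simp [hq])), pv_modify_modify]
      simp

-- main characterization of B's scatter pass, bucket by bucket
theorem pv_scatter_main (ids0 : List Int) (b : Nat) (hb : 0 < b) (numN : Nat)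
    (h1 : 1 ≤ numN) (hlast : (numN - 1) * b ≤ ids0.length) :
    ∀ (m g : Nat) (pre : List (List Int)), g + m = numN - 1 → pre.length = g →
      (PySem.List.enumerate (ids0.drop (g * b)) ((g * b : Nat) : Int)).foldl
        (fun acc p =>
          acc.modify (min (PySem.Int.floordiv p.1 (b : Int)) ((numN : Int) - 1)).toNat
            (fun t => t ++ [p.2]))
        (pre ++ List.replicate (numN - g) [])
      = pre ++ (List.range m).map (fun j => (ids0.drop (g * b + j * b)).take b)
          ++ [ids0.drop ((numN - 1) * b)] := by
  intro m
  induction m with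
  | zero =>
      intro g pre hg hpre
      have hgeq : g = numN - 1 := by omega
      have hNg : numN - g = 1 := by omega
      have hmin : (numN : Int) - 1 = ((numN - 1 : Nat) : Int) := by omega
      have hidx : ∀ p ∈ PySem.List.enumerate (ids0.drop (g * b)) ((g * b : Nat) : Int),
          (min (PySem.Int.floordiv p.1 (b : Int)) ((numN : Int) - 1)).toNat = g := by
        intro p hp
        rcases (PySem.List.mem_enumerate_iff _ _ _).mp hp with ⟨k, hk, rfl⟩
        have hcast : ((g * b : Nat) : Int) + (k : Int) = ((g * b + k : Nat) : Int) := by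
          push_cast; ring
        have hdiv : g ≤ (g * b + k) / b := by
          calc g = (g * b) / b := by rw [Nat.mul_div_cancel _ hb]
          _ ≤ (g * b + k) / b := Nat.div_le_div_right (by omega)
        rw [hcast, PySem.Int.floordiv_natCast, hmin, ← Nat.cast_min]
        simp only [Int.toNat_natCast]
        omega
      rw [pv_scatter_const _ _ _ _ g hidx]
      rw [hNg, PySem.List.map_snd_enumerate]
      have hmod := pv_modify_append pre [] []
        (fun t => t ++ ids0.drop (g * b))
      rw [hpre] at hmod
      rw [List.replicate_one, hmod, hgeq]
      simp
  | succ m ih =>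
      intro g pre hg hpre
      have hglt : g + 1 ≤ numN - 1 := by omega
      have hgb : (g + 1) * b ≤ ids0.length := by
        calc (g + 1) * b ≤ (numN - 1) * b := Nat.mul_le_mul_right _ hglt
        _ ≤ ids0.length := hlast
      set c := (ids0.drop (g * b)).take b with hc
      have hclen : c.length = b := by
        rw [hc, List.length_take, List.length_drop]
        have : g * b + b ≤ ids0.length := by nlinarith
        omega
      have hsplit : ids0.drop (g * b) = c ++ ids0.drop ((g + 1) * b) := by
        rw [hc]
        have : (g + 1) * b = g * b + b := by ring
        rw [this, pv_take_drop_glue]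
      rw [hsplit, PySem.List.enumerate_append, List.foldl_append]
      have hstart : ((g * b : Nat) : Int) + (c.length : Int) = (((g + 1) * b : Nat) : Int) := by
        rw [hclen]; push_cast; ring
      have hidx : ∀ p ∈ PySem.List.enumerate c ((g * b : Nat) : Int),
          (min (PySem.Int.floordiv p.1 (b : Int)) ((numN : Int) - 1)).toNat = g := by
        intro p hp
        rcases (PySem.List.mem_enumerate_iff _ _ _).mp hp with ⟨k, hk, rfl⟩
        have hcast : ((g * b : Nat) : Int) + (k : Int) = ((g * b + k : Nat) : Int) := by
          push_cast; ring
        have hkb : k < b := by omega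
        have hdiv : (g * b + k) / b = g := by
          rw [Nat.add_comm, Nat.add_mul_div_right _ _ hb, Nat.div_eq_of_lt hkb]
          omega
        have hmin : (numN : Int) - 1 = ((numN - 1 : Nat) : Int) := by omega
        rw [hcast, PySem.Int.floordiv_natCast, hmin, ← Nat.cast_min]
        simp only [Int.toNat_natCast, hdiv]
        omega
      rw [pv_scatter_const _ _ _ _ g hidx, PySem.List.map_snd_enumerate]
      have hrepl : List.replicate (numN - g) ([] : List Int) =
          [] :: List.replicate (numN - (g + 1)) [] := by
        have : numN - g = (numN - (g + 1)) + 1 := by omega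
        rw [this, List.replicate_succ]
      have hmod := pv_modify_append pre [] (List.replicate (numN - (g + 1)) [])
        (fun t => t ++ c)
      rw [hpre] at hmod
      rw [hrepl, hmod]
      have hacc : pre ++ ([] ++ c) :: List.replicate (numN - (g + 1)) ([] : List Int)
          = (pre ++ [c]) ++ List.replicate (numN - (g + 1)) [] := by simp
      rw [hacc, hstart]
      rw [ih (g + 1) (pre ++ [c]) (by omega) (by simp [hpre])]
      have : (g + 1) * b = g * b + b := by ring
      rw [this]
      rw [hc, List.append_assoc pre, pv_chunk_shift]

set_option maxHeartbeats 2000000 in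
theorem make_groups_spec_aux (tg_user_ids : List Int) (base_size : Int)
    (hpre : Pre_make_groups tg_user_ids base_size) :
    make_groups tg_user_ids base_size = make_groups_alt tg_user_ids base_size := by
  by_cases hn1 : (tg_user_ids.length : Int) ≤ 1
  · simp [make_groups, make_groups_alt, hn1]
  by_cases hn6 : (tg_user_ids.length : Int) ≤ 6
  · simp [make_groups, make_groups_alt, hn1, hn6]
  have hnn : 6 < tg_user_ids.length := by exact_mod_cast not_le.mp hn6
  have hbase : 1 ≤ base_size := by
    rcases hpre with h | h
    · omega
    · exact h
  set ids := tg_user_ids with hids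
  obtain ⟨b, hb0, hbeq⟩ : ∃ b : Nat, 0 < b ∧ base_size = (b : Int) :=
    ⟨base_size.toNat, by omega, by omega⟩
  subst hbeq
  set nn := ids.length with hnndef
  set kk := nn / b with hkk
  set rr := nn % b with hrr
  have hdm : b * kk + rr = nn := Nat.div_add_mod nn b
  have hrb : rr < b := Nat.mod_lt _ hb0
  set numN := kk + (if 3 ≤ rr then 1 else 0) with hnumN
  have hkb : kk * b ≤ nn := by rw [Nat.mul_comm]; omega
  have hnumN0 : rr < 3 → numN = kk := by
    intro h; rw [hnumN, if_neg (by omega), Nat.add_zero]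
  have hnumN1 : 3 ≤ rr → numN = kk + 1 := by
    intro h; rw [hnumN, if_pos h]
  have hnum1 : 1 ≤ numN := by
    rcases Nat.lt_or_ge rr 3 with h | h
    · have hk1 : kk ≥ 1 := by nlinarith
      rw [hnumN0 h]; exact hk1
    · rw [hnumN1 h]; exact Nat.succ_le_succ (Nat.zero_le _)
  have hlastle : (numN - 1) * b ≤ nn := by
    rcases Nat.lt_or_ge rr 3 with h | h
    · rw [hnumN0 h]
      exact le_trans (Nat.mul_le_mul_right _ (Nat.sub_le _ _)) hkb
    · rw [hnumN1 h]
      simpa using hkb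
  -- B's value
  have hB : make_groups_alt ids (b : Int)
      = (List.range (numN - 1)).map (fun j => (ids.drop (j * b)).take b)
          ++ [ids.drop ((numN - 1) * b)] := by
    have hmain := pv_scatter_main ids b hb0 numN hnum1 hlastle (numN - 1) 0 [] (by omega) rfl
    simp only [Nat.zero_mul, List.drop_zero, Nat.cast_zero, List.nil_append, Nat.sub_zero,
      Nat.zero_add] at hmain
    unfold make_groups_alt
    rw [if_neg hn1, if_neg hn6]
    simp only [← hnndef]
    have hfd : PySem.Int.floordiv (nn : Int) (b : Int) = ((kk : Nat) : Int) :=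
      PySem.Int.floordiv_natCast nn b
    have hmd : PySem.Int.mod (nn : Int) (b : Int) = ((rr : Nat) : Int) :=
      PySem.Int.mod_natCast nn b
    have hite : (if (3 : Int) ≤ ((rr : Nat) : Int) then (1 : Int) else 0)
        = (((if 3 ≤ rr then 1 else 0 : Nat)) : Int) := by
      by_cases h : 3 ≤ rr
      · simp [h, show (3 : Int) ≤ ((rr : Nat) : Int) by exact_mod_cast h]
      · have : ¬ (3 : Int) ≤ ((rr : Nat) : Int) := by
          intro hc; exact h (by exact_mod_cast hc)
        simp [h, this]
    have hnumeq : PySem.Int.floordiv (nn : Int) (b : Int) +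
        (if (3 : Int) ≤ PySem.Int.mod (nn : Int) (b : Int) then (1 : Int) else 0)
        = ((numN : Nat) : Int) := by
      rw [hfd, hmd, hite, hnumN]; push_cast; ring
    rw [hnumeq]
    simpa using hmain
  rw [hB]
  -- A's value
  have hA := pvALoop_char ids b hb0 kk (nn + 1) 0 []
    (by have := Nat.div_le_self nn b; omega)
    (by nlinarith) (by nlinarith)
  unfold make_groups
  rw [if_neg hn1, if_neg hn6]
  simp only [← hnndef]
  have hfuel : ((nn : Int)).toNat + 1 = nn + 1 := by simp
  rw [hfuel]
  simp only [Nat.zero_add, Nat.cast_zero] at hA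
  rw [← hnndef] at hA
  rw [hA]
  simp only [List.nil_append]
  have hremcast : (nn : Int) - ((kk * b : Nat) : Int) = ((rr : Nat) : Int) := by
    push_cast; nlinarith
  rw [hremcast]
  have hslice : PySem.List.slice ids (some ((kk * b : Nat) : Int)) none
      = ids.drop (kk * b) := PySem.List.slice_from_natCast ids (kk * b)
  rcases Nat.lt_or_ge rr 3 with hr3 | hr3
  · -- rr ∈ {0, 1, 2}: numN = kk ≥ 1
    have hkk1 : 1 ≤ kk := by nlinarith
    have hnumeq : numN = kk := by simp [hnumN, Nat.not_le.mpr hr3]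
    have hrange : List.range kk = List.range (kk - 1) ++ [kk - 1] := by
      conv_lhs => rw [show kk = (kk - 1) + 1 by omega]
      rw [List.range_succ]
    interval_cases rr
    · -- rr = 0: straight chunks, last chunk is the whole tail
      rw [if_pos (by norm_num)]
      have hlen : (ids.drop ((kk - 1) * b)).length = b := by
        rw [List.length_drop]
        have : (kk - 1) * b + b = kk * b := by
          have : kk = (kk - 1) + 1 := by omega
          nlinarith
        omega
      rw [hrange, List.map_append, hnumeq]
      simp only [List.map_cons, List.map_nil]
      congr 1
      rw [List.take_of_length_le (by rw [hlen])]
    · -- rr = 1: tail merged into last chunk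
      rw [if_neg (by norm_num), if_pos (by norm_num)]
      rw [hrange, List.map_append, hnumeq]
      simp only [List.map_cons, List.map_nil]
      rw [List.dropLast_concat, List.getLastD_concat, hslice]
      congr 1
      have hsum : kk * b = (kk - 1) * b + b := by
        have : kk = (kk - 1) + 1 := by omega
        nlinarith
      rw [hsum, pv_take_drop_glue]
    · -- rr = 2: same merged-tail shape
      rw [if_neg (by norm_num), if_pos (by norm_num)]
      rw [hrange, List.map_append, hnumeq]
      simp only [List.map_cons, List.map_nil]
      rw [List.dropLast_concat, List.getLastD_concat, hslice]
      congr 1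
      have hsum : kk * b = (kk - 1) * b + b := by
        have : kk = (kk - 1) + 1 := by omega
        nlinarith
      rw [hsum, pv_take_drop_glue]
  · -- rr ≥ 3: the tail is its own (last) group
    have hnumeq : numN = kk + 1 := by simp [hnumN, hr3]
    have hr0 : ¬ ((rr : Nat) : Int) = 0 := by
      intro h; have : rr = 0 := by exact_mod_cast h
      omega
    have hr12 : ¬ (((rr : Nat) : Int) = 1 ∨ ((rr : Nat) : Int) = 2) := by
      rintro (h | h)
      · have : rr = 1 := by exact_mod_cast h
        omega
      · have : rr = 2 := by exact_mod_cast h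
        omega
    rw [if_neg hr0, if_neg hr12]
    have hgoal : (List.range kk).map (fun j => (ids.drop (j * b)).take b)
        ++ [PySem.List.slice ids (some ((kk * b : Nat) : Int)) none]
        = (List.range (numN - 1)).map (fun j => (ids.drop (j * b)).take b)
          ++ [ids.drop ((numN - 1) * b)] := by
      rw [hslice, hnumeq]
      simp
    by_cases h3 : ((rr : Nat) : Int) = 3
    · rw [if_pos h3]; exact hgoal
    · rw [if_neg h3]; exact hgoal

-- ===== VERDICT (by name: the statement is the Claim_ definition above) =====
theorem make_groups_spec : Claim_equal_make_groups := by
  intro ids base _ hpre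
  unfold Spec_make_groups
  exact make_groups_spec_aux ids base hpre
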